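-- pv_equiv track=rewrite | github.com/Arsen1302/Code-copy-detector | TestData/solutions/problem_1519_3.py | solution_1519_3
-- ===== SOURCE A (Python) =====
-- def solution_1519_3(text: str, pattern: str) -> int:
--   if pattern[0] == pattern[1]:
--     letter = 1
--     for i in range (len(text)) :
--       if text[i] == pattern[0] : letter += 1
--     return letter*(letter-1)//2
--   else :
--     letter = 1
--     ans1 = 0
--     for i in range (len(text)) :
--       if   text[i] == pattern[0] : letter += 1
--       elif text[i] == pattern[1] : ans1 += letter
--
--     letter = 1
--     ans2 = 0
--     for i in range (len(text)-1, -1, -1) :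
--       if   text[i] == pattern[1] : letter += 1
--       elif text[i] == pattern[0] : ans2 += letter
--
--     return max(ans1, ans2)
-- ===== SOURCE B (Python) =====
-- def solution_1519_3(text: str, pattern: str) -> int:
--     p0, p1 = pattern[0], pattern[1]
--     if p0 == p1:
--         c = text.count(p0)
--         return c * (c + 1) // 2
--     c0 = c1 = pairs = 0
--     for ch in text:
--         if ch == p0:
--             c0 += 1
--         elif ch == p1:
--             c1 += 1
--             pairs += c0
--     return pairs + max(c0, c1)
-- ===== Notes on version B (the rewrite author's own statement) =====
-- stated objective: faster
-- what changed: B replaces A's two index loops over the text (forward and backward) by a single forward character pass maintaining (count p0, count p1, pairs) and returns pairs + max of the counts, using the identity max(ans1,ans2) = pairs + max(count0,count1); the equal-character branch uses str.count with a closed form instead of a counting loop.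
import Mathlib
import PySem

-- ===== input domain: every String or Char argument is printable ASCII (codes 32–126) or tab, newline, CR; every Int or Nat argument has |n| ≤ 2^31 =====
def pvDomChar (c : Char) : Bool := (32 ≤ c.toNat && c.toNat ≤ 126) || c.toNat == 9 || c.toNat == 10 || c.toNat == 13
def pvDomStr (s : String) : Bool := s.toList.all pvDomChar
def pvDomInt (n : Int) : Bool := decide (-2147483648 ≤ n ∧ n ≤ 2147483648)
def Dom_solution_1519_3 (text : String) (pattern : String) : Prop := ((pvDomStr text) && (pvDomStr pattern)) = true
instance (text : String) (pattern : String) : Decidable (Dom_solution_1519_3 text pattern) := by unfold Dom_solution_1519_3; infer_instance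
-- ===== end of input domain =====

-- B replaces A's two index loops of the unequal branch by one forward character pass (pairs + max of the
-- two counts) and the equal branch's counting loop by str.count with a closed form; return value only.

-- ===== PORT A =====
-- pattern[0]/pattern[1] raise IndexError when pattern has fewer than 2 chars; Pre_ excludes that,
-- so the defaulted reads below are exact on every admitted input.
def solution_1519_3 (text : String) (pattern : String) : Int :=
  let tl := text.toList
  let p0 := PySem.List.pyGetD pattern.toList 0 ' '
  let p1 := PySem.List.pyGetD pattern.toList 1 ' '
  if p0 = p1 then
    let letter : Int := (PySem.List.pyRange 0 (PySem.Str.len text) 1).foldl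
      (fun letter i => if PySem.List.pyGetD tl i ' ' = p0 then letter + 1 else letter) 1
    PySem.Int.floordiv (letter * (letter - 1)) 2
  else
    let st1 := (PySem.List.pyRange 0 (PySem.Str.len text) 1).foldl
      (fun (st : Int × Int) i =>
        if PySem.List.pyGetD tl i ' ' = p0 then (st.1 + 1, st.2)
        else if PySem.List.pyGetD tl i ' ' = p1 then (st.1, st.2 + st.1) else st) (1, 0)
    let st2 := (PySem.List.pyRange (PySem.Str.len text - 1) (-1) (-1)).foldl
      (fun (st : Int × Int) i =>
        if PySem.List.pyGetD tl i ' ' = p1 then (st.1 + 1, st.2)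
        else if PySem.List.pyGetD tl i ' ' = p0 then (st.1, st.2 + st.1) else st) (1, 0)
    max st1.2 st2.2

-- ===== PORT B =====
def solution_1519_3_alt (text : String) (pattern : String) : Int :=
  let p0 := PySem.List.pyGetD pattern.toList 0 ' '
  let p1 := PySem.List.pyGetD pattern.toList 1 ' '
  if p0 = p1 then
    let c : Int := (PySem.Str.count text (String.ofList [p0]) : Int)
    PySem.Int.floordiv (c * (c + 1)) 2
  else
    let st := text.toList.foldl
      (fun (st : Int × Int × Int) ch =>
        if ch = p0 then (st.1 + 1, st.2.1, st.2.2)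
        else if ch = p1 then (st.1, st.2.1 + 1, st.2.2 + st.1) else st) (0, 0, 0)
    st.2.2 + max st.1 st.2.1

-- ===== PRECONDITION & SPEC =====
-- Pre_ excludes only the inputs where the Python A raises IndexError (pattern shorter than 2 chars);
-- B raises there too.
def Pre_solution_1519_3 (text : String) (pattern : String) : Prop := 2 ≤ pattern.toList.length
instance (text : String) (pattern : String) : Decidable (Pre_solution_1519_3 text pattern) := by unfold Pre_solution_1519_3; infer_instance
def pvWitness_solution_1519_3 : String × String := ("abab", "ab")
def Spec_solution_1519_3 (text : String) (pattern : String) (out : Int) : Prop := out = solution_1519_3_alt text pattern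
instance (text : String) (pattern : String) (out : Int) : Decidable (Spec_solution_1519_3 text pattern out) := by unfold Spec_solution_1519_3; infer_instance

-- ===== CLAIM (what is proved, stated in full; the proofs are below) =====
def Claim_equal_solution_1519_3 : Prop := ∀ (text : String) (pattern : String), Dom_solution_1519_3 text pattern → Pre_solution_1519_3 text pattern → Spec_solution_1519_3 text pattern (solution_1519_3 text pattern)

-- ===== LEMMAS AND PROOFS =====

-- count of a char, as Int
def cntI (a : Char) (l : List Char) : Int := (l.count a : Int)

-- number of pairs i < j with l[i] = p, l[j] = q
def pairsI (p q : Char) : List Char → Int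
  | [] => 0
  | c :: l => pairsI p q l + (if c = p then cntI q l else 0)

theorem cntI_nil (a : Char) : cntI a [] = 0 := by simp [cntI]

theorem cntI_cons (a c : Char) (l : List Char) :
    cntI a (c :: l) = cntI a l + (if c = a then 1 else 0) := by
  by_cases h : c = a <;> simp [cntI, List.count_cons, h]

theorem cntI_reverse (a : Char) (l : List Char) : cntI a l.reverse = cntI a l := by
  simp [cntI]

theorem cntI_append (a : Char) (u v : List Char) :
    cntI a (u ++ v) = cntI a u + cntI a v := by
  simp [cntI, List.count_append]

theorem pairsI_append (p q : Char) (u v : List Char) :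
    pairsI p q (u ++ v) = pairsI p q u + pairsI p q v + cntI p u * cntI q v := by
  induction u with
  | nil => simp [pairsI, cntI_nil]
  | cons c u ih =>
    by_cases h : c = p <;>
      simp [pairsI, h, ih, cntI_cons, cntI_append] <;> ring

theorem pairsI_reverse (p q : Char) (l : List Char) :
    pairsI q p l.reverse = pairsI p q l := by
  induction l with
  | nil => rfl
  | cons c l ih =>
    rw [List.reverse_cons, pairsI_append, ih]
    by_cases h : c = p <;> simp [pairsI, cntI_nil, cntI_cons, cntI_reverse, h] <;> ring

-- A's counting loop (equal branch)
theorem foldl_count (p : Char) (l : List Char) : ∀ (a : Int),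
    l.foldl (fun acc c => if c = p then acc + 1 else acc) a = a + cntI p l := by
  induction l with
  | nil => intro a; simp [cntI_nil]
  | cons c l ih =>
    intro a
    by_cases h : c = p <;> simp [List.foldl_cons, h, ih, cntI_cons] <;> ring

-- A's forward loop (also its backward loop, with p and q swapped)
theorem foldl_A (p q : Char) (hpq : p ≠ q) (l : List Char) : ∀ (a b : Int),
    l.foldl (fun (st : Int × Int) c =>
        if c = p then (st.1 + 1, st.2)
        else if c = q then (st.1, st.2 + st.1) else st) (a, b)
      = (a + cntI p l, b + a * cntI q l + pairsI p q l) := by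
  induction l with
  | nil => intro a b; simp [cntI, pairsI]
  | cons c l ih =>
    intro a b
    by_cases h : c = p
    · subst h
      simp only [List.foldl_cons, if_pos rfl, ih, pairsI, cntI, List.count_cons,
        Prod.mk.injEq, beq_iff_eq, hpq, if_false]
      push_cast
      exact ⟨by ring, by ring⟩
    · by_cases h' : c = q
      · subst h'
        simp only [List.foldl_cons, if_neg h, ih, pairsI, cntI, List.count_cons,
          Prod.mk.injEq, beq_iff_eq, h, if_false, if_pos rfl, beq_self_eq_true, if_true]
        push_cast
        exact ⟨by ring, by ring⟩
      · simp only [List.foldl_cons, if_neg h, if_neg h', ih, pairsI, cntI, List.count_cons,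
          Prod.mk.injEq, beq_iff_eq, h, h', if_false]
        push_cast
        exact ⟨by ring, by ring⟩

-- B's single pass
theorem foldl_B (p q : Char) (hpq : p ≠ q) (l : List Char) : ∀ (x y z : Int),
    l.foldl (fun (st : Int × Int × Int) ch =>
        if ch = p then (st.1 + 1, st.2.1, st.2.2)
        else if ch = q then (st.1, st.2.1 + 1, st.2.2 + st.1) else st) (x, y, z)
      = (x + cntI p l, y + cntI q l, z + x * cntI q l + pairsI p q l) := by
  induction l with
  | nil => intro x y z; simp [cntI, pairsI]
  | cons c l ih =>
    intro x y z
    by_cases h : c = p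
    · subst h
      simp only [List.foldl_cons, if_pos rfl, ih, pairsI, cntI, List.count_cons,
        Prod.mk.injEq, beq_iff_eq, hpq, if_false]
      push_cast
      exact ⟨by ring, by ring, by ring⟩
    · by_cases h' : c = q
      · subst h'
        simp only [List.foldl_cons, if_neg h, ih, pairsI, cntI, List.count_cons,
          Prod.mk.injEq, beq_iff_eq, h, if_false, if_pos rfl, beq_self_eq_true, if_true]
        push_cast
        exact ⟨by ring, by ring, by ring⟩
      · simp only [List.foldl_cons, if_neg h, if_neg h', ih, pairsI, cntI, List.count_cons,
          Prod.mk.injEq, beq_iff_eq, h, h', if_false]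
        push_cast
        exact ⟨by ring, by ring, by ring⟩

-- Python's str.count with a single-character needle is the character count
theorem count_go_single (c : Char) : ∀ (l : List Char) (fuel acc : Nat), l.length ≤ fuel →
    PySem.Chars.count.go [c] fuel l acc = acc + l.count c := by
  intro l
  induction l with
  | nil => intro fuel acc h; cases fuel <;> simp [PySem.Chars.count.go]
  | cons hd t ih =>
    intro fuel acc h
    cases fuel with
    | zero => simp at h
    | succ f =>
      rw [PySem.Chars.count.go]
      by_cases hc : hd = c
      · subst hc
        simp [List.isPrefixOf, ih f (acc + 1) (by simpa using h)]
        omega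
      · simp [List.isPrefixOf, Ne.symm hc, hc, ih f acc (by simpa using h)]

theorem count_single (l : List Char) (c : Char) : PySem.Chars.count l [c] = l.count c := by
  simp [PySem.Chars.count, count_go_single c l l.length 0 le_rfl]

-- A's backward index loop is the forward fold over the reversed characters
theorem bwd_loop_eq (tl : List Char) (f : Int × Int → Char → Int × Int) (init : Int × Int) :
    (PySem.List.pyRange ((tl.length : Int) - 1) (-1) (-1)).foldl
        (fun st i => f st (PySem.List.pyGetD tl i ' ')) init
      = tl.reverse.foldl f init := by
  have hrange : PySem.List.pyRange ((tl.length : Int) - 1) (-1) (-1)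
      = (PySem.List.pyRange 0 (tl.length : Int) 1).reverse := by
    rw [PySem.List.pyRange_neg_one_eq_reverse]; norm_num
  have hmap : (PySem.List.pyRange 0 (tl.length : Int) 1).map
      (fun j => PySem.List.pyGetD tl j ' ') = tl := PySem.List.map_pyGetD_pyRange_zero' tl ' '
  rw [hrange]
  conv_rhs => rw [← hmap, ← List.map_reverse, List.foldl_map]

-- ===== VERDICT (by name: the statement is the Claim_ definition above) =====
theorem solution_1519_3_spec : Claim_equal_solution_1519_3 := by
  intro text pattern _ _
  unfold Spec_solution_1519_3 solution_1519_3 solution_1519_3_alt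
  set tl := text.toList with htl
  set p0 := PySem.List.pyGetD pattern.toList 0 ' '
  set p1 := PySem.List.pyGetD pattern.toList 1 ' '
  by_cases hp : p0 = p1
  · simp only [hp, if_pos rfl, if_pos]
    rw [show PySem.Str.len text = (tl.length : Int) from by simp [PySem.Str.len, htl],
        PySem.List.foldl_pyRange_zero_pyGetD' tl ' '
          (fun (acc : Int) c => if c = p1 then acc + 1 else acc) 1,
        foldl_count]
    have hc : (PySem.Str.count text (String.ofList [p1]) : Int) = cntI p1 tl := by
      simp [PySem.Str.count, String.toList_ofList, count_single, cntI, htl]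
    rw [hc]; ring_nf
  · simp only [if_neg hp]
    rw [show PySem.Str.len text = (tl.length : Int) from by simp [PySem.Str.len, htl],
        PySem.List.foldl_pyRange_zero_pyGetD' tl ' '
          (fun (st : Int × Int) c =>
            if c = p0 then (st.1 + 1, st.2)
            else if c = p1 then (st.1, st.2 + st.1) else st) (1, 0),
        bwd_loop_eq tl
          (fun (st : Int × Int) c =>
            if c = p1 then (st.1 + 1, st.2)
            else if c = p0 then (st.1, st.2 + st.1) else st) (1, 0)]
    rw [foldl_A p0 p1 hp tl 1 0, foldl_A p1 p0 (Ne.symm hp) tl.reverse 1 0,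
        foldl_B p0 p1 hp tl 0 0 0]
    simp only [cntI_reverse, pairsI_reverse]
    rw [show (0 : Int) + cntI p0 tl = cntI p0 tl from by ring,
        show (0 : Int) + cntI p1 tl = cntI p1 tl from by ring]
    omega
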